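-- pv_equiv track=rewrite | github.com/DanielKalicki/s2v_linker | train/batchers/wiki_full_links_batch.py | find_all_links
-- ===== SOURCE A (Python) =====
-- import copy
--
-- def get_links(title, linkset):
--     try:
--         return linkset[title]['links']
--     except KeyError:
--         return []
--
-- def find_all_links(title, linkset, depth=100):
--     links = set()
--     links.update(get_links(title, linkset))
--     links_length = len(links)
--     for _ in range(0, depth):
--         for link in copy.copy(links):
--             links.update(get_links(link, linkset))
--         if len(links) == links_length:
--             break
--         else:
--             links_length = len(links)
--     return links
-- ===== SOURCE B (Python) =====
-- def get_links(title, linkset):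
--     try:
--         return linkset[title]['links']
--     except KeyError:
--         return []
--
-- def find_all_links(title, linkset, depth=100):
--     # Frontier-based, depth-capped BFS: each round expands only the newly
--     # discovered nodes instead of re-scanning the whole reachable set.
--     result = list(dict.fromkeys(get_links(title, linkset)))
--     seen = set(result)
--     frontier = result
--     for _ in range(depth):
--         new = []
--         for node in frontier:
--             for x in get_links(node, linkset):
--                 if x not in seen:
--                     seen.add(x)
--                     new.append(x)
--         if not new:
--             break
--         result = result + new
--         frontier = new
--     return set(result)
-- ===== Notes on version B (the rewrite author's own statement) =====
-- stated objective: alternative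
-- what changed: Replaced the fixpoint loop that re-expands every already-known link each round with a frontier-based level-capped BFS that expands only newly discovered nodes once, using an ordered seen-set.
import Mathlib
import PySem

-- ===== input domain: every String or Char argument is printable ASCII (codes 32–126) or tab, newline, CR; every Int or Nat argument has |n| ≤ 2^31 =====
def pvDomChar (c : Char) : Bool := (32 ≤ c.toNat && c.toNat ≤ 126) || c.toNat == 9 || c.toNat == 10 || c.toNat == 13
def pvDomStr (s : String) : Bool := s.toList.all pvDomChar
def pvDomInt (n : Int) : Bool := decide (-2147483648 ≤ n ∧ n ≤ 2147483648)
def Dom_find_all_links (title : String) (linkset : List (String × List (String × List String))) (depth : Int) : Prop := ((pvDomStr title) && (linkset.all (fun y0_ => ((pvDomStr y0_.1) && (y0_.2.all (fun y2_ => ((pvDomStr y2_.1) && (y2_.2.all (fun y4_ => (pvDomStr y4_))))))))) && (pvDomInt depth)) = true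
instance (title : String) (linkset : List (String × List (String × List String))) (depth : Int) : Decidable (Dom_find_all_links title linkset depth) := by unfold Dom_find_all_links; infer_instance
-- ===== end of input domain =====

-- B replaces A's fixpoint loop (re-expanding the whole set each round) by a frontier-based
-- depth-capped BFS expanding only newly found nodes: same set in the same order.

-- ===== PORT A =====
-- linkset[title]['links'] with KeyError caught at either level
def get_links (title : String) (linkset : List (String × List (String × List String))) : List String :=
  match PySem.Dict.get? ⟨linkset⟩ title with
  | none => []
  | some d =>
    match PySem.Dict.get? ⟨d⟩ "links" with
    | none => []
    | some l => l

-- the 'for _ in range(0, depth)' loop with its break, state = (links, links_length)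
def findLoopA (linkset : List (String × List (String × List String))) :
    Nat → PySem.Set String → Nat → PySem.Set String
  | 0, links, _ => links
  | n+1, links, linksLength =>
    let links' := links.foldl (fun s link => PySem.Set.update s (get_links link linkset)) links
    if links'.length = linksLength then links'
    else findLoopA linkset n links' links'.length

def find_all_links (title : String) (linkset : List (String × List (String × List String))) (depth : Int) : List String :=
  let links : PySem.Set String := PySem.Set.update PySem.Set.empty (get_links title linkset)
  findLoopA linkset depth.toNat links links.length

-- ===== PORT B =====
-- Source B's inner double loop over the frontier: state = (result, new); 'seen' in Source B always
-- equals set(result), so 'x not in seen' is membership in the result list.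
def bfsExpand (linkset : List (String × List (String × List String)))
    (frontier : List String) (res : List String) : List String × List String :=
  frontier.foldl
    (fun p node =>
      (get_links node linkset).foldl
        (fun q x => if x ∈ q.1 then q else (q.1 ++ [x], q.2 ++ [x])) p)
    (res, [])

-- Source B's 'for _ in range(depth)' loop with its break
def findLoopB (linkset : List (String × List (String × List String))) :
    Nat → List String → List String → List String
  | 0, res, _ => res
  | n+1, res, frontier =>
    let rn := bfsExpand linkset frontier res
    if rn.2 = [] then rn.1
    else findLoopB linkset n rn.1 rn.2

def find_all_links_alt (title : String) (linkset : List (String × List (String × List String))) (depth : Int) : List String :=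
  let init := PySem.List.dedup (get_links title linkset)
  findLoopB linkset depth.toNat init init

-- ===== PRECONDITION & SPEC =====
def Spec_find_all_links (title : String) (linkset : List (String × List (String × List String))) (depth : Int) (out : List String) : Prop := out = find_all_links_alt title linkset depth
instance (title : String) (linkset : List (String × List (String × List String))) (depth : Int) (out : List String) : Decidable (Spec_find_all_links title linkset depth out) := by unfold Spec_find_all_links; infer_instance

-- ===== CLAIM (what is proved, stated in full; the proofs are below) =====
def Claim_equal_find_all_links : Prop := ∀ (title : String) (linkset : List (String × List (String × List String))) (depth : Int), Dom_find_all_links title linkset depth → Spec_find_all_links title linkset depth (find_all_links title linkset depth)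

-- ===== LEMMAS AND PROOFS =====

-- updating a set with elements it already has is a no-op
theorem update_of_subset (s : PySem.Set String) (l : List String)
    (h : ∀ y ∈ l, y ∈ s) : PySem.Set.update s l = s := by
  rw [PySem.Set.update_eq_append_filter]
  have hf : List.filter (fun y => !s.contains y) (PySem.Set.ofList l) = [] := by
    rw [List.filter_eq_nil_iff]
    intro y hy
    have hs : y ∈ s := h y ((PySem.Set.mem_ofList l y).mp hy)
    simp [hs]
  rw [hf, List.append_nil]

-- A's inner pass over the already-closed part of the set changes nothing
theorem foldA_noop (linkset : List (String × List (String × List String))) :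
    ∀ (old : List String) (s : PySem.Set String),
      (∀ x ∈ old, ∀ y ∈ get_links x linkset, y ∈ s) →
      old.foldl (fun s link => PySem.Set.update s (get_links link linkset)) s = s := by
  intro old
  induction old with
  | nil => intro s _; rfl
  | cons x old ih =>
    intro s h
    simp only [List.foldl_cons]
    rw [update_of_subset s _ (h x (by simp))]
    exact ih s (fun z hz y hy => h z (by simp [hz]) y hy)

-- folding updates only grows the set
theorem foldA_mono (linkset : List (String × List (String × List String))) :
    ∀ (front : List String) (s : PySem.Set String) (y : String), y ∈ s →
      y ∈ front.foldl (fun s link => PySem.Set.update s (get_links link linkset)) s := by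
  intro front
  induction front with
  | nil => intro s y hy; exact hy
  | cons x front ih =>
    intro s y hy
    simp only [List.foldl_cons]
    exact ih _ y ((PySem.Set.mem_update _ _ y).mpr (Or.inl hy))

-- after a round, every frontier node's links are in the set
theorem foldA_covers (linkset : List (String × List (String × List String))) :
    ∀ (front : List String) (s : PySem.Set String) (x : String), x ∈ front →
      ∀ y ∈ get_links x linkset,
        y ∈ front.foldl (fun s link => PySem.Set.update s (get_links link linkset)) s := by
  intro front
  induction front with
  | nil => intro s x hx; cases hx
  | cons z front ih =>
    intro s x hx y hy
    simp only [List.foldl_cons]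
    rcases List.mem_cons.mp hx with h | h
    · subst h
      exact foldA_mono linkset front _ y ((PySem.Set.mem_update _ _ y).mpr (Or.inr hy))
    · exact ih _ x h y hy

-- B's dedup-append fold over one node's links is A's Set.update, tracking the appended tail
theorem innerPair : ∀ (l r nw : List String), ∃ d : List String,
    l.foldl (fun q x => if x ∈ q.1 then q else (q.1 ++ [x], q.2 ++ [x])) (r, nw)
      = (r ++ d, nw ++ d) ∧ r ++ d = PySem.Set.update r l := by
  intro l
  induction l with
  | nil => intro r nw; exact ⟨[], by simp, by simp [PySem.Set.update_nil]⟩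
  | cons x l ih =>
    intro r nw
    simp only [List.foldl_cons]
    by_cases hx : x ∈ r
    · rcases ih r nw with ⟨d, h1, h2⟩
      refine ⟨d, by simpa [hx] using h1, ?_⟩
      rw [PySem.Set.update_cons, PySem.Set.add_of_mem hx]
      exact h2
    · rcases ih (r ++ [x]) (nw ++ [x]) with ⟨d, h1, h2⟩
      refine ⟨[x] ++ d, ?_, ?_⟩
      · simpa [hx, List.append_assoc] using h1
      · rw [PySem.Set.update_cons, PySem.Set.add_of_not_mem hx]
        simpa [List.append_assoc] using h2

-- B's round (bfsExpand) equals A's fold of updates over the frontier, tracking the new tail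
theorem expandPair (linkset : List (String × List (String × List String))) :
    ∀ (front r nw : List String), ∃ d : List String,
      front.foldl
          (fun p node =>
            (get_links node linkset).foldl
              (fun q x => if x ∈ q.1 then q else (q.1 ++ [x], q.2 ++ [x])) p)
          (r, nw)
        = (r ++ d, nw ++ d) ∧
      r ++ d = front.foldl (fun s node => PySem.Set.update s (get_links node linkset)) r := by
  intro front
  induction front with
  | nil => intro r nw; exact ⟨[], by simp, by simp⟩
  | cons node front ih =>
    intro r nw
    simp only [List.foldl_cons]
    rcases innerPair (get_links node linkset) r nw with ⟨d0, h1, h2⟩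
    rw [h1]
    rcases ih (r ++ d0) (nw ++ d0) with ⟨d1, h3, h4⟩
    refine ⟨d0 ++ d1, ?_, ?_⟩
    · simpa [List.append_assoc] using h3
    · rw [← h2]
      simpa [List.append_assoc] using h4

-- main loop invariant: A's whole-set rounds equal B's frontier rounds when every
-- non-frontier element's links are already in the set
theorem loop_eq (linkset : List (String × List (String × List String))) :
    ∀ (n : Nat) (old front : List String),
      (∀ x ∈ old, ∀ y ∈ get_links x linkset, y ∈ old ++ front) →
      findLoopA linkset n (old ++ front) (old ++ front).length
        = findLoopB linkset n (old ++ front) front := by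
  intro n
  induction n with
  | zero => intro old front _; rfl
  | succ n ih =>
    intro old front hclosed
    rcases expandPair linkset front (old ++ front) [] with ⟨d, h1, h2⟩
    have hA : (old ++ front).foldl
        (fun s link => PySem.Set.update s (get_links link linkset)) (old ++ front)
        = (old ++ front) ++ d := by
      rw [List.foldl_append, foldA_noop linkset old (old ++ front) hclosed, ← h2]
    simp only [findLoopA, findLoopB, bfsExpand, h1, hA]
    by_cases hd : d = []
    · subst hd
      simp
    · have hlen : ((old ++ front) ++ d).length ≠ (old ++ front).length := by
        simp only [List.length_append]
        have : 0 < d.length := List.length_pos_iff.mpr hd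
        omega
      simp only [if_neg hlen]
      simp only [List.nil_append]
      rw [if_neg hd]
      have := ih (old ++ front) d (by
        intro x hx y hy
        rcases List.mem_append.mp hx with h | h
        · exact List.mem_append.mpr (Or.inl (hclosed x h y hy))
        · rw [h2]
          exact foldA_covers linkset front (old ++ front) x h y hy)
      simpa using this

-- ===== VERDICT (by name: the statement is the Claim_ definition above) =====
theorem find_all_links_spec : Claim_equal_find_all_links := by
  intro title linkset depth _
  unfold Spec_find_all_links find_all_links find_all_links_alt
  simp only [PySem.Set.update_empty, PySem.List.dedup_eq_ofList]
  have := loop_eq linkset depth.toNat [] (PySem.Set.ofList (get_links title linkset))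
    (by intro x hx; cases hx)
  simpa using this
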